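-- pv_equiv track=rewrite | github.com/ebakoba/vigenere-breaker | main.py | findCosets
-- ===== SOURCE A (Python) =====
-- def findCosets(text, lenght):
--   co_sets = []
--   for _ in range(0, lenght):
--     co_sets.append([])
--
--   for index, character in enumerate(text):
--     co_set_index = index % lenght
--     co_sets[co_set_index].append(character)
--   return co_sets
-- ===== SOURCE B (Python) =====
-- def findCosets(text, lenght):
--   return [list(text[i::lenght]) for i in range(lenght)]
-- ===== Notes on version B (the rewrite author's own statement) =====
-- stated objective: idiomatic
-- what changed: B builds each coset directly with a strided slice text[i::lenght] in a comprehension (lenght gathers), instead of A's single scatter pass that appends each character to co_sets[index % lenght].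
import Mathlib
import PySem

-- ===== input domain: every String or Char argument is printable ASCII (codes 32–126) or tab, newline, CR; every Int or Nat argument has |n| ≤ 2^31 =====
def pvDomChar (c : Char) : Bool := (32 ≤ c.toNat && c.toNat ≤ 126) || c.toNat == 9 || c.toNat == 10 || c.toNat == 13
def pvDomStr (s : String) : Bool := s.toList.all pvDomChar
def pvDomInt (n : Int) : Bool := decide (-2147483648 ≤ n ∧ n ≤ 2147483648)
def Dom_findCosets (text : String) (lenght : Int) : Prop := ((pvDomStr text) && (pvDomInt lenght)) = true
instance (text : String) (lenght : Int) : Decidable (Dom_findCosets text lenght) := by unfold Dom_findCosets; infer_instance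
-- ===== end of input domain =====

-- B partitions the text by strided slices text[i::lenght] (one gather per coset) instead of
-- A's single scatter loop appending each character at index % lenght; same cost, more idiomatic.

-- ===== PORT A =====
-- loop body of A's second for-loop: co_sets[index % lenght].append(character)
def scatStep (lenght : Int) (cs : List (List String)) (p : Int × Char) : List (List String) :=
  match PySem.List.pyIdx? cs.length (PySem.Int.mod p.1 lenght) with
  | some j => cs.set j ((cs.getD j []) ++ [String.ofList [p.2]])
  | none => cs   -- Python raises IndexError here (lenght < 0 on non-empty text); excluded by Pre_

def findCosets (text : String) (lenght : Int) : List (List String) :=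
  let co_sets : List (List String) :=
    (PySem.List.pyRange 0 lenght 1).foldl (fun acc _ => acc ++ [[]]) []
  (PySem.List.enumerate text.toList 0).foldl (scatStep lenght) co_sets

-- ===== PORT B =====
def findCosets_alt (text : String) (lenght : Int) : List (List String) :=
  (PySem.List.pyRange 0 lenght 1).map (fun i =>
    ((PySem.List.slice? text.toList (some i) none lenght).getD []).map (fun c => String.ofList [c]))

-- ===== PRECONDITION & SPEC =====
-- Pre_ excludes lenght ≤ 0 with non-empty text: there A raises (ZeroDivisionError for
-- lenght = 0 from index % lenght, IndexError for negative lenght on the empty co_sets list).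
def Pre_findCosets (text : String) (lenght : Int) : Prop := 1 ≤ lenght ∨ text = ""
instance (text : String) (lenght : Int) : Decidable (Pre_findCosets text lenght) := by unfold Pre_findCosets; infer_instance
def pvWitness_findCosets : String × Int := ("attackatdawn", 3)

def Spec_findCosets (text : String) (lenght : Int) (out : List (List String)) : Prop := out = findCosets_alt text lenght
instance (text : String) (lenght : Int) (out : List (List String)) : Decidable (Spec_findCosets text lenght out) := by unfold Spec_findCosets; infer_instance

-- ===== CLAIM (what is proved, stated in full; the proofs are below) =====
def Claim_equal_findCosets : Prop := ∀ (text : String) (lenght : Int), Dom_findCosets text lenght → Pre_findCosets text lenght → Spec_findCosets text lenght (findCosets text lenght)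

-- ===== LEMMAS AND PROOFS =====

-- python index resolution for an in-range nonnegative index
theorem pyIdx?_of_nonneg_lt {n : Nat} {i : Int} (h0 : 0 ≤ i) (h : i < (n : Int)) :
    PySem.List.pyIdx? n i = some i.toNat := by
  simp [PySem.List.pyIdx?, h0, h]

-- the positions below n that are ≡ j (mod k), in order, are the stride j, j+k, j+2k, …
theorem filter_range_mod (k j : Nat) (hk : 0 < k) (hj : j < k) :
    ∀ n : Nat, (List.range n).filter (fun p => p % k == j)
      = (List.range ((n - j + k - 1) / k)).map (fun t => j + k * t) := by
  intro n
  induction n with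
  | zero =>
    have h0 : (0 - j + k - 1) / k = 0 := Nat.div_eq_of_lt (by omega)
    simp only [h0, List.range_zero, List.filter_nil, List.map_nil]
  | succ n ih =>
    rw [List.range_succ, List.filter_append, ih]
    by_cases hjn : j ≤ n
    · set q := (n - j) / k with hq
      set r := (n - j) % k with hr
      have hd : k * q + r = n - j := Nat.div_add_mod (n - j) k
      have hrk : r < k := Nat.mod_lt _ hk
      have hx : k * (q + 1) = k * q + k := by ring
      have hmod : n % k = (j + r) % k := by
        have : n = k * q + (j + r) := by omega
        rw [this, Nat.mul_add_mod]
      by_cases hcase : r = 0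
      · have hnk : n % k = j := by
          rw [hmod, hcase]; simp [Nat.mod_eq_of_lt hj]
        have hc1 : (n + 1 - j + k - 1) / k = q + 1 := by
          have e : n + 1 - j + k - 1 = k * (q + 1) := by omega
          rw [e, Nat.mul_div_cancel_left _ hk]
        have hc0 : (n - j + k - 1) / k = q := by
          have e : n - j + k - 1 = k * q + (k - 1) := by omega
          rw [e, Nat.mul_add_div hk, Nat.div_eq_of_lt (by omega)]
          omega
        rw [hc0, hc1, List.range_succ, List.map_append]
        simp only [List.filter_cons, List.filter_nil, hnk, beq_self_eq_true, if_true,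
          List.map_cons, List.map_nil]
        have : j + k * q = n := by omega
        rw [this]
      · have hnk : n % k ≠ j := by
          rw [hmod]
          by_cases hlt : j + r < k
          · rw [Nat.mod_eq_of_lt hlt]; omega
          · have e : j + r = k * 1 + (j + r - k) := by omega
            rw [e, Nat.mul_add_mod, Nat.mod_eq_of_lt (by omega)]
            omega
        have hc : (n + 1 - j + k - 1) / k = (n - j + k - 1) / k := by
          have e1 : n + 1 - j + k - 1 = k * (q + 1) + r := by omega
          have e2 : n - j + k - 1 = k * q + (r + k - 1) := by omega
          have e3 : (r + k - 1) / k = 1 := by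
            have e : r + k - 1 = k * 1 + (r - 1) := by omega
            rw [e, Nat.mul_add_div hk, Nat.div_eq_of_lt (by omega)]
          rw [e1, e2, Nat.mul_add_div hk, Nat.mul_add_div hk, e3,
            Nat.div_eq_of_lt hrk]
        rw [hc]
        simp [hnk]
    · have h1 : (n - j + k - 1) / k = 0 := Nat.div_eq_of_lt (by omega)
      have h2 : (n + 1 - j + k - 1) / k = 0 := Nat.div_eq_of_lt (by omega)
      have h3 : n % k ≠ j := by have := Nat.mod_le n k; omega
      simp [h1, h2, h3]

-- the scatter fold keeps the outer length
theorem scat_length (L : Int) : ∀ (ps : List (Int × Char)) (acc : List (List String)),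
    (ps.foldl (scatStep L) acc).length = acc.length := by
  intro ps
  induction ps with
  | nil => intro acc; rfl
  | cons p t ih =>
    intro acc
    have hstep : (scatStep L acc p).length = acc.length := by
      unfold scatStep
      cases PySem.List.pyIdx? acc.length (PySem.Int.mod p.1 L) with
      | none => rfl
      | some j => simp
    simp only [List.foldl_cons, ih, hstep]

-- invariant of A's scatter loop: coset j collects the pairs with index ≡ j (mod k)
theorem scat_getElem? (k : Int) (hk : 1 ≤ k) :
    ∀ (ps : List (Int × Char)) (acc : List (List String)), acc.length = k.toNat →
    ∀ (j : Nat) (hj : j < acc.length),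
    (ps.foldl (scatStep k) acc)[j]? =
      some (acc[j] ++ (ps.filter (fun p => PySem.Int.mod p.1 k == (j : Int))).map
        (fun p => String.ofList [p.2])) := by
  intro ps
  induction ps with
  | nil => intro acc _ j hj; simp [List.getElem?_eq_getElem hj]
  | cons p t ih =>
    intro acc hlen j hj
    have hm0 : 0 ≤ PySem.Int.mod p.1 k := PySem.Int.mod_nonneg _ (by omega)
    have hmlt : PySem.Int.mod p.1 k < k := PySem.Int.mod_lt _ (by omega)
    have hcast : ((acc.length : Int)) = k := by
      rw [hlen]; omega
    have hidx : PySem.List.pyIdx? acc.length (PySem.Int.mod p.1 k)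
        = some (PySem.Int.mod p.1 k).toNat := pyIdx?_of_nonneg_lt hm0 (by rw [hcast]; exact hmlt)
    set m : Nat := (PySem.Int.mod p.1 k).toNat with hmdef
    have hmlt' : m < acc.length := by
      have := hmlt; omega
    have hstep : scatStep k acc p = acc.set m (acc[m] ++ [String.ofList [p.2]]) := by
      unfold scatStep
      rw [hidx]
      simp [List.getD_eq_getElem?_getD, List.getElem?_eq_getElem hmlt']
    rw [List.foldl_cons, hstep,
        ih _ (by simp [hlen]) j (by simp [hj])]
    have hmodcast : (PySem.Int.mod p.1 k == (j : Int)) = decide (m = j) := by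
      by_cases h : m = j
      · simp [h]; omega
      · simp [h]; omega
    by_cases h : m = j
    · subst h
      simp [hmodcast]
    · rw [List.filter_cons]
      simp only [hmodcast, h, decide_false, Bool.false_eq_true, if_false]
      rw [List.getElem_set_ne (by omega)]

-- B's strided slice, computed: start = min j len, stop = len, ceil-division count
theorem slice?_pos (xs : List Char) (j k : Int) (hk : 1 ≤ k) (h0 : 0 ≤ j) :
    (PySem.List.slice? xs (some j) none k).getD []
      = (List.range ((((xs.length : Int) - min j (xs.length : Int) + k - 1) / k).toNat)).filterMap
          (fun (t : Nat) => xs[(min j (xs.length : Int) + k * (t : Int)).toNat]?) := by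
  have hkne : ¬ (k = 0) := by omega
  have hklt : ¬ (k < 0) := by omega
  have hjlt : ¬ (j < 0) := by omega
  have hkpos : (0 : Int) < k := by omega
  simp only [PySem.List.slice?, PySem.List.sliceIndices, hkne, hklt, hjlt, if_false, if_pos hkpos,
    Option.getD_some]
  by_cases hse : min j (xs.length : Int) < (xs.length : Int)
  · rw [if_pos hse]
  · rw [if_neg hse]
    have hmin : min j (xs.length : Int) = (xs.length : Int) := by omega
    have he : (xs.length : Int) - min j (xs.length : Int) + k - 1 = k - 1 := by omega
    rw [he, Int.ediv_eq_zero_of_lt (by omega) (by omega)]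
    rfl

-- A's coset j (filter by index mod k) equals B's strided slice at j
theorem gather_eq (xs : List Char) (k : Int) (hk : 1 ≤ k) (j : Nat) (hj : (j : Int) < k) :
    ((PySem.List.enumerate xs 0).filter (fun p => PySem.Int.mod p.1 k == (j : Int))).map
        (fun p => String.ofList [p.2])
      = ((PySem.List.slice? xs (some (j : Int)) none k).getD []).map
          (fun c => String.ofList [c]) := by
  set k' : Nat := k.toNat with hk'def
  have hkk : k = (k' : Int) := by omega
  have hk0 : 0 < k' := by omega
  have hjk : j < k' := by omega
  set n : Nat := xs.length with hn
  set cnt : Nat := (n - j + k' - 1) / k' with hcnt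
  have hlhs : ((PySem.List.enumerate xs 0).filter (fun p => PySem.Int.mod p.1 k == (j : Int))).map
        (fun p => String.ofList [p.2])
      = (List.range cnt).map (fun t => String.ofList [xs.getD (j + k' * t) 'a']) := by
    rw [PySem.List.enumerate_eq_map_pyRange xs 'a']
    have hlen : PySem.List.len xs = (n : Int) := by simp only [PySem.List.len_eq, hn]
    rw [hlen, PySem.List.pyRange_zero_natCast, List.filter_map, List.filter_map]
    have hcond : ∀ p ∈ List.range n,
        (((fun p : Int × Char => PySem.Int.mod p.1 k == (j:Int)) ∘
          (fun j' : Int => (j', PySem.List.pyGetD xs j' 'a'))) ∘ (fun m : Nat => (m : Int))) p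
        = ((fun p : Nat => p % k' == j) p) := by
      intro p _
      simp only [Function.comp_apply, hkk, PySem.Int.mod_natCast]
      by_cases h : p % k' = j
      · simp [h]
      · simp [h]
        exact_mod_cast h
    rw [List.filter_congr hcond, filter_range_mod k' j hk0 hjk n]
    simp only [List.map_map, List.map_map]
    apply List.map_congr_left
    intro t ht
    simp only [Function.comp_apply, PySem.List.pyGetD_natCast]
  have hrhs : ((PySem.List.slice? xs (some (j : Int)) none k).getD []).map
          (fun c => String.ofList [c])
      = (List.range cnt).map (fun t => String.ofList [xs.getD (j + k' * t) 'a']) := by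
    rw [slice?_pos xs (j:Int) k hk (by omega)]
    by_cases hjn : j < n
    · have hmin : min (j : Int) ((xs.length : Int)) = (j : Int) := by
        simp only [← hn]; omega
      have hcntI : ((((xs.length : Int)) - min (j:Int) ((xs.length : Int)) + k - 1) / k).toNat = cnt := by
        rw [hmin, hkk, ← hn]
        have e : ((n:Int)) - (j:Int) + (k':Int) - 1 = ((n - j + k' - 1 : Nat) : Int) := by
          omega
        rw [e]
        rw [← Int.natCast_div, Int.toNat_natCast]
      rw [hcntI]
      have hbound : ∀ t, t < cnt → j + k' * t < n := by
        intro t ht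
        have h1 : k' * (t + 1) ≤ k' * cnt := Nat.mul_le_mul_left _ (by omega)
        have h2 : cnt * k' ≤ n - j + k' - 1 := Nat.div_mul_le_self _ _
        have h3 : k' * (t + 1) = k' * t + k' := by ring
        have h4 : k' * cnt = cnt * k' := by ring
        omega
      have hcongr : ∀ t ∈ List.range cnt,
          xs[(min (j:Int) ((xs.length : Int)) + k * (t:Int)).toNat]?
            = some (xs.getD (j + k' * t) 'a') := by
        intro t ht
        have htc : t < cnt := List.mem_range.mp ht
        have hidx : (min (j:Int) ((xs.length : Int)) + k * (t:Int)).toNat = j + k' * t := by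
          rw [hmin, hkk]; omega
        rw [hidx]
        have hb := hbound t htc
        rw [List.getElem?_eq_getElem (by omega), List.getD_eq_getElem _ _ (by omega)]
      rw [List.filterMap_congr hcongr]
      simp
    · have hmin : min (j : Int) ((xs.length : Int)) = ((xs.length : Int)) := by
        simp only [← hn]; omega
      have hc0 : ((((xs.length : Int)) - min (j:Int) ((xs.length : Int)) + k - 1) / k).toNat = 0 := by
        rw [hmin]
        have e : ((xs.length : Int)) - ((xs.length : Int)) + k - 1 = k - 1 := by omega
        rw [e, Int.ediv_eq_zero_of_lt (by omega) (by omega)]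
        rfl
      have hc1 : cnt = 0 := by
        rw [hcnt]
        exact Nat.div_eq_of_lt (by omega)
      rw [hc0, hc1]
      simp
  rw [hlhs, hrhs]

-- ===== VERDICT (by name: the statement is the Claim_ definition above) =====
theorem findCosets_spec : Claim_equal_findCosets := by
  intro text lenght _ hpre
  unfold Pre_findCosets at hpre
  unfold Spec_findCosets
  by_cases h1 : 1 ≤ lenght
  · set k' : Nat := lenght.toNat with hk'
    have hkk : lenght = (k' : Int) := by omega
    unfold findCosets findCosets_alt
    simp only []
    rw [PySem.List.foldl_append_singleton_eq_map, List.nil_append]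
    have hrange : PySem.List.pyRange 0 lenght 1 = (List.range k').map (fun (m : Nat) => (m : Int)) := by
      rw [hkk]; exact PySem.List.pyRange_zero_natCast k'
    rw [hrange]
    set init : List (List String) := ((List.range k').map (fun (m : Nat) => (m : Int))).map
      (fun _ => ([] : List String)) with hinit
    have hinitlen : init.length = k' := by simp [hinit]
    apply List.ext_getElem?
    intro j
    by_cases hj : j < k'
    · rw [scat_getElem? lenght h1 _ init (by omega) j (by omega)]
      have hinitj : init[j]'(by omega) = [] := by simp [hinit]
      rw [hinitj, List.nil_append]
      rw [List.getElem?_map, List.getElem?_map, List.getElem?_range hj]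
      simp only [Option.map_some]
      rw [gather_eq text.toList lenght h1 j (by omega)]
    · have hl : (List.foldl (scatStep lenght) init (PySem.List.enumerate text.toList 0)).length = k' := by
        rw [scat_length]; omega
      rw [List.getElem?_eq_none (by omega), List.getElem?_eq_none (by simp; omega)]
  · have htext : text = "" := by tauto
    have hrange : PySem.List.pyRange 0 lenght 1 = [] := by
      apply List.eq_nil_iff_forall_not_mem.mpr
      intro x hx
      have := PySem.List.mem_pyRange_one.mp hx
      omega
    subst htext
    unfold findCosets findCosets_alt
    simp [hrange]
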